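-- pv_equiv track=rewrite | github.com/qri-io/starlib | dataframe/py/comparator.py | apply_allow_diff
-- ===== SOURCE A (Python) =====
-- def apply_allow_diff(text, allow_diff):
--   result = []
--   c = 0
--   needle = allow_diff['after']
--   replace = allow_diff['before']
--   for line in text.split('\n'):
--     if c < len(needle) and line == needle[c]:
--       line = replace[c]
--       c += 1
--     result.append(line)
--   return '\n'.join(result)
-- ===== SOURCE B (Python) =====
-- def apply_allow_diff(text, allow_diff):
--   # Two-pass decomposition: first build an index table of replacements, then rebuild.
--   needle = allow_diff['after']
--   replace = allow_diff['before']
--   lines = text.split('\n')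
--   repl = {}
--   c = 0
--   for i, line in enumerate(lines):
--     if c < len(needle) and line == needle[c]:
--       repl[i] = replace[c]
--       c += 1
--   return '\n'.join(repl.get(i, line) for i, line in enumerate(lines))
-- ===== Notes on version B (the rewrite author's own statement) =====
-- stated objective: alternative
-- what changed: A's single interleaved scan that appends (possibly replaced) lines is split into two passes: a matching pass that records a dict index->replacement, then a separate join over enumerate(lines) substituting via the dict.
import Mathlib
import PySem

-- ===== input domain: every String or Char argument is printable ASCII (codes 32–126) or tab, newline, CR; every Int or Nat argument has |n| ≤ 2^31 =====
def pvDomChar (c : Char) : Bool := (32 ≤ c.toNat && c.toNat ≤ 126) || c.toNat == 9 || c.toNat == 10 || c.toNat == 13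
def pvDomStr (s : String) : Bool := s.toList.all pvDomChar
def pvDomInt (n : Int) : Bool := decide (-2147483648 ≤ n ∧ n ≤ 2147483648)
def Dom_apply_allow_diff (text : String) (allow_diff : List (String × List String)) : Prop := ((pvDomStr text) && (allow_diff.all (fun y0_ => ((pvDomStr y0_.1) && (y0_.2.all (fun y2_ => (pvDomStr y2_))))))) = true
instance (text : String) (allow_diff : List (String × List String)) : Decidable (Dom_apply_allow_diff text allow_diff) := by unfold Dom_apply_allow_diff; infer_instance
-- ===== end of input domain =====

-- B replaces A's single interleaved scan by a two-pass decomposition (match table, then rebuild);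
-- equal cost, 'alternative' objective.

-- ===== PORT A =====
-- text.split('\n')  ('\n' ≠ "", so split? is some)
def pvLines (text : String) : List String :=
  (PySem.Str.split? text "\n").getD []

def apply_allow_diff (text : String) (allow_diff : List (String × List String)) : String :=
  -- allow_diff['after'] / allow_diff['before']: KeyError is excluded by Pre_; the total getD
  -- stands for the lookup under that precondition.
  let needle := PySem.Dict.getD (PySem.Dict.mk allow_diff) "after" []
  let replace := PySem.Dict.getD (PySem.Dict.mk allow_diff) "before" []
  -- the for loop: state (result, c); replace[c] is pyGetD under Pre_ (IndexError excluded)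
  let step : (List String × Int) → String → (List String × Int) := fun st line =>
    if st.2 < (needle.length : Int) ∧ line = PySem.List.pyGetD needle st.2 "" then
      (st.1 ++ [PySem.List.pyGetD replace st.2 ""], st.2 + 1)
    else
      (st.1 ++ [line], st.2)
  PySem.Str.join "\n" ((pvLines text).foldl step ([], 0)).1

-- ===== PORT B =====
-- first pass of Source B: fold over enumerate(lines) building repl : Dict Int String
def pvBuildRepl (needle replace : List String) : List (Int × String) → Int → PySem.Dict Int String → PySem.Dict Int String
  | [], _, d => d
  | (i, line) :: rest, c, d =>
    if c < (needle.length : Int) ∧ line = PySem.List.pyGetD needle c "" then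
      pvBuildRepl needle replace rest (c + 1) (d.insert i (PySem.List.pyGetD replace c ""))
    else
      pvBuildRepl needle replace rest c d

def apply_allow_diff_alt (text : String) (allow_diff : List (String × List String)) : String :=
  let needle := PySem.Dict.getD (PySem.Dict.mk allow_diff) "after" []
  let replace := PySem.Dict.getD (PySem.Dict.mk allow_diff) "before" []
  let lines := pvLines text
  let repl := pvBuildRepl needle replace (PySem.List.enumerate lines) 0 PySem.Dict.empty
  PySem.Str.join "\n" ((PySem.List.enumerate lines).map (fun p => repl.getD p.1 p.2))

-- ===== PRECONDITION & SPEC =====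
-- Pre_ excludes exactly the inputs where the Python A raises: KeyError when 'after' or 'before'
-- is missing, and IndexError when more than len(before) lines greedily match the prefix of
-- 'after' (the greedy match count equals the length of the longest prefix of the needle that is
-- a sublist of the lines, whence the Sublist formulation).
def Pre_apply_allow_diff (text : String) (allow_diff : List (String × List String)) : Prop :=
  ((PySem.Dict.mk allow_diff).contains "after") = true ∧
  ((PySem.Dict.mk allow_diff).contains "before") = true ∧
  (let needle := PySem.Dict.getD (PySem.Dict.mk allow_diff) "after" []
   let replace := PySem.Dict.getD (PySem.Dict.mk allow_diff) "before" []
   needle.length ≤ replace.length ∨ ¬ (needle.take (replace.length + 1)).Sublist (pvLines text))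
instance (text : String) (allow_diff : List (String × List String)) : Decidable (Pre_apply_allow_diff text allow_diff) := by unfold Pre_apply_allow_diff; infer_instance

def pvWitness_apply_allow_diff : String × (List (String × List String)) :=
  ("a\nb\nc", [("after", ["b"]), ("before", ["B"])])

def Spec_apply_allow_diff (text : String) (allow_diff : List (String × List String)) (out : String) : Prop := out = apply_allow_diff_alt text allow_diff
instance (text : String) (allow_diff : List (String × List String)) (out : String) : Decidable (Spec_apply_allow_diff text allow_diff out) := by unfold Spec_apply_allow_diff; infer_instance

-- ===== CLAIM (what is proved, stated in full; the proofs are below) =====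
def Claim_equal_apply_allow_diff : Prop := ∀ (text : String) (allow_diff : List (String × List String)), Dom_apply_allow_diff text allow_diff → Pre_apply_allow_diff text allow_diff → Spec_apply_allow_diff text allow_diff (apply_allow_diff text allow_diff)

-- ===== LEMMAS AND PROOFS =====

-- the common value of both loops: the replaced line sequence, as a structural recursion
def pvGo (needle replace : List String) : List String → Int → List String
  | [], _ => []
  | line :: rest, c =>
    if c < (needle.length : Int) ∧ line = PySem.List.pyGetD needle c "" then
      PySem.List.pyGetD replace c "" :: pvGo needle replace rest (c + 1)
    else
      line :: pvGo needle replace rest c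

-- A's fold produces acc ++ pvGo
theorem pvFoldA (needle replace : List String) (ls : List String) :
    ∀ (c : Int) (acc : List String),
      (ls.foldl (fun st line =>
        if st.2 < (needle.length : Int) ∧ line = PySem.List.pyGetD needle st.2 "" then
          (st.1 ++ [PySem.List.pyGetD replace st.2 ""], st.2 + 1)
        else
          (st.1 ++ [line], st.2)) (acc, c)).1 = acc ++ pvGo needle replace ls c := by
  induction ls with
  | nil => intro c acc; simp [pvGo]
  | cons line rest ih =>
      intro c acc
      simp only [List.foldl_cons, pvGo]
      by_cases h : c < (needle.length : Int) ∧ line = PySem.List.pyGetD needle c ""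
      · simp only [if_pos h, ih]; simp
      · simp only [if_neg h, ih]; simp

-- pvBuildRepl leaves lookups at keys not occurring in es unchanged
theorem pvBuildRepl_getD_of_not_mem (needle replace : List String) (es : List (Int × String)) :
    ∀ (c : Int) (d : PySem.Dict Int String) (j : Int) (v : String),
      (∀ p ∈ es, p.1 ≠ j) →
      (pvBuildRepl needle replace es c d).getD j v = d.getD j v := by
  induction es with
  | nil => intro c d j v _; rfl
  | cons p rest ih =>
      intro c d j v h
      obtain ⟨i, line⟩ := p
      have hj : i ≠ j := h (i, line) (by simp)
      have hrest : ∀ q ∈ rest, q.1 ≠ j := fun q hq => h q (by simp [hq])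
      simp only [pvBuildRepl]
      by_cases hc : c < (needle.length : Int) ∧ line = PySem.List.pyGetD needle c ""
      · rw [if_pos hc, ih _ _ _ _ hrest, PySem.Dict.getD_insert_of_ne _ _ _ hj.symm]
      · rw [if_neg hc, ih _ _ _ _ hrest]

theorem pvEnum_fst_ge (ls : List String) (s : Int) (p : Int × String)
    (hp : p ∈ PySem.List.enumerate ls s) : s ≤ p.1 := by
  rcases (PySem.List.mem_enumerate_iff _ _ _).1 hp with ⟨k, hk, rfl⟩
  simp

-- B's second pass over the dict built by the first pass equals pvGo
theorem pvMapB (needle replace : List String) (ls : List String) :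
    ∀ (i c : Int) (d : PySem.Dict Int String),
      (∀ (j : Int) (v : String), i ≤ j → d.getD j v = v) →
      (PySem.List.enumerate ls i).map
        (fun p => (pvBuildRepl needle replace (PySem.List.enumerate ls i) c d).getD p.1 p.2)
        = pvGo needle replace ls c := by
  induction ls with
  | nil => intro i c d _; simp [PySem.List.enumerate_nil, pvGo]
  | cons line rest ih =>
      intro i c d hd
      rw [PySem.List.enumerate_cons]
      simp only [List.map_cons, pvGo, pvBuildRepl]
      have hfresh : ∀ p ∈ PySem.List.enumerate rest (i + 1), p.1 ≠ i := by
        intro p hp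
        have := pvEnum_fst_ge rest (i + 1) p hp
        omega
      by_cases h : c < (needle.length : Int) ∧ line = PySem.List.pyGetD needle c ""
      · rw [if_pos h, if_pos h]
        congr 1
        · rw [pvBuildRepl_getD_of_not_mem _ _ _ _ _ _ _ hfresh,
            PySem.Dict.getD_insert_self]
        · exact ih (i + 1) (c + 1) _ (by
            intro j v hj
            rw [PySem.Dict.getD_insert_of_ne _ _ _ (by omega : j ≠ i)]
            exact hd j v (by omega))
      · rw [if_neg h, if_neg h]
        congr 1
        · rw [pvBuildRepl_getD_of_not_mem _ _ _ _ _ _ _ hfresh]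
          exact hd i line le_rfl
        · exact ih (i + 1) c d (fun j v hj => hd j v (by omega))

-- ===== VERDICT (by name: the statement is the Claim_ definition above) =====
theorem apply_allow_diff_spec : Claim_equal_apply_allow_diff := by
  intro text allow_diff _ _
  show apply_allow_diff text allow_diff = apply_allow_diff_alt text allow_diff
  unfold apply_allow_diff apply_allow_diff_alt
  simp only []
  rw [pvFoldA, pvMapB]
  · simp
  · intro j v _
    rfl
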